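-- pv_equiv track=rewrite | github.com/ChipsMetaverse/gvses-market-insights | backend/services/forex_pairs.py | search_forex_pairs
-- ===== SOURCE A (Python) =====
-- from typing import List, Dict, Any
--
-- FOREX_PAIRS = [
--     # Major Pairs (USD-based)
--     {"symbol": "EURUSD=X", "name": "EUR/USD", "base": "EUR", "quote": "USD", "category": "major", "description": "Euro vs US Dollar"},
--     {"symbol": "GBPUSD=X", "name": "GBP/USD", "base": "GBP", "quote": "USD", "category": "major", "description": "British Pound vs US Dollar"},
--     {"symbol": "USDJPY=X", "name": "USD/JPY", "base": "USD", "quote": "JPY", "category": "major", "description": "US Dollar vs Japanese Yen"},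
--     {"symbol": "USDCHF=X", "name": "USD/CHF", "base": "USD", "quote": "CHF", "category": "major", "description": "US Dollar vs Swiss Franc"},
--     {"symbol": "AUDUSD=X", "name": "AUD/USD", "base": "AUD", "quote": "USD", "category": "major", "description": "Australian Dollar vs US Dollar"},
--     {"symbol": "USDCAD=X", "name": "USD/CAD", "base": "USD", "quote": "CAD", "category": "major", "description": "US Dollar vs Canadian Dollar"},
--     {"symbol": "NZDUSD=X", "name": "NZD/USD", "base": "NZD", "quote": "USD", "category": "major", "description": "New Zealand Dollar vs US Dollar"},
--
--     # Cross Pairs (Non-USD)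
--     {"symbol": "EURGBP=X", "name": "EUR/GBP", "base": "EUR", "quote": "GBP", "category": "cross", "description": "Euro vs British Pound"},
--     {"symbol": "EURJPY=X", "name": "EUR/JPY", "base": "EUR", "quote": "JPY", "category": "cross", "description": "Euro vs Japanese Yen"},
--     {"symbol": "GBPJPY=X", "name": "GBP/JPY", "base": "GBP", "quote": "JPY", "category": "cross", "description": "British Pound vs Japanese Yen"},
--     {"symbol": "EURCHF=X", "name": "EUR/CHF", "base": "EUR", "quote": "CHF", "category": "cross", "description": "Euro vs Swiss Franc"},
--     {"symbol": "EURAUD=X", "name": "EUR/AUD", "base": "EUR", "quote": "AUD", "category": "cross", "description": "Euro vs Australian Dollar"},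
--     {"symbol": "EURCAD=X", "name": "EUR/CAD", "base": "EUR", "quote": "CAD", "category": "cross", "description": "Euro vs Canadian Dollar"},
--     {"symbol": "GBPCHF=X", "name": "GBP/CHF", "base": "GBP", "quote": "CHF", "category": "cross", "description": "British Pound vs Swiss Franc"},
--     {"symbol": "GBPAUD=X", "name": "GBP/AUD", "base": "GBP", "quote": "AUD", "category": "cross", "description": "British Pound vs Australian Dollar"},
--     {"symbol": "GBPCAD=X", "name": "GBP/CAD", "base": "GBP", "quote": "CAD", "category": "cross", "description": "British Pound vs Canadian Dollar"},
--     {"symbol": "AUDCAD=X", "name": "AUD/CAD", "base": "AUD", "quote": "CAD", "category": "cross", "description": "Australian Dollar vs Canadian Dollar"},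
--     {"symbol": "AUDJPY=X", "name": "AUD/JPY", "base": "AUD", "quote": "JPY", "category": "cross", "description": "Australian Dollar vs Japanese Yen"},
--     {"symbol": "AUDCHF=X", "name": "AUD/CHF", "base": "AUD", "quote": "CHF", "category": "cross", "description": "Australian Dollar vs Swiss Franc"},
--     {"symbol": "NZDJPY=X", "name": "NZD/JPY", "base": "NZD", "quote": "JPY", "category": "cross", "description": "New Zealand Dollar vs Japanese Yen"},
--     {"symbol": "CADJPY=X", "name": "CAD/JPY", "base": "CAD", "quote": "JPY", "category": "cross", "description": "Canadian Dollar vs Japanese Yen"},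
--     {"symbol": "CHFJPY=X", "name": "CHF/JPY", "base": "CHF", "quote": "JPY", "category": "cross", "description": "Swiss Franc vs Japanese Yen"},
--
--     # Exotic Pairs
--     {"symbol": "USDTRY=X", "name": "USD/TRY", "base": "USD", "quote": "TRY", "category": "exotic", "description": "US Dollar vs Turkish Lira"},
--     {"symbol": "USDMXN=X", "name": "USD/MXN", "base": "USD", "quote": "MXN", "category": "exotic", "description": "US Dollar vs Mexican Peso"},
--     {"symbol": "USDZAR=X", "name": "USD/ZAR", "base": "USD", "quote": "ZAR", "category": "exotic", "description": "US Dollar vs South African Rand"},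
--     {"symbol": "USDBRL=X", "name": "USD/BRL", "base": "USD", "quote": "BRL", "category": "exotic", "description": "US Dollar vs Brazilian Real"},
--     {"symbol": "USDINR=X", "name": "USD/INR", "base": "USD", "quote": "INR", "category": "exotic", "description": "US Dollar vs Indian Rupee"},
--     {"symbol": "USDKRW=X", "name": "USD/KRW", "base": "USD", "quote": "KRW", "category": "exotic", "description": "US Dollar vs South Korean Won"},
--     {"symbol": "USDSGD=X", "name": "USD/SGD", "base": "USD", "quote": "SGD", "category": "exotic", "description": "US Dollar vs Singapore Dollar"},
--     {"symbol": "USDHKD=X", "name": "USD/HKD", "base": "USD", "quote": "HKD", "category": "exotic", "description": "US Dollar vs Hong Kong Dollar"},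
--     {"symbol": "USDRUB=X", "name": "USD/RUB", "base": "USD", "quote": "RUB", "category": "exotic", "description": "US Dollar vs Russian Ruble"},
--     {"symbol": "USDPLN=X", "name": "USD/PLN", "base": "USD", "quote": "PLN", "category": "exotic", "description": "US Dollar vs Polish Zloty"},
--     {"symbol": "USDSEK=X", "name": "USD/SEK", "base": "USD", "quote": "SEK", "category": "exotic", "description": "US Dollar vs Swedish Krona"},
--     {"symbol": "USDNOK=X", "name": "USD/NOK", "base": "USD", "quote": "NOK", "category": "exotic", "description": "US Dollar vs Norwegian Krone"},
--     {"symbol": "USDDKK=X", "name": "USD/DKK", "base": "USD", "quote": "DKK", "category": "exotic", "description": "US Dollar vs Danish Krone"},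
--     {"symbol": "USDCZK=X", "name": "USD/CZK", "base": "USD", "quote": "CZK", "category": "exotic", "description": "US Dollar vs Czech Koruna"},
--     {"symbol": "USDHUF=X", "name": "USD/HUF", "base": "USD", "quote": "HUF", "category": "exotic", "description": "US Dollar vs Hungarian Forint"},
--     {"symbol": "USDTHB=X", "name": "USD/THB", "base": "USD", "quote": "THB", "category": "exotic", "description": "US Dollar vs Thai Baht"},
-- ]
--
-- def search_forex_pairs(query: str, limit: int = 20) -> List[Dict[str, Any]]:
--     """
--     Search forex pairs by symbol, name, base currency, or quote currency.
--
--     Args: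
--         query: Search term (e.g., "eur", "usd", "gbp/usd")
--         limit: Maximum number of results to return
--
--     Returns:
--         List of matching forex pairs with full metadata
--     """
--     if not query:
--         return FOREX_PAIRS[:limit]
--
--     query_lower = query.lower().strip()
--     filtered = []
--
--     for pair in FOREX_PAIRS:
--         # Check if query matches symbol, name, base, quote, or description
--         symbol_match = query_lower in pair["symbol"].lower()
--         name_match = query_lower in pair["name"].lower()
--         base_match = query_lower == pair["base"].lower() or query_lower in pair["base"].lower()
--         quote_match = query_lower == pair["quote"].lower() or query_lower in pair["quote"].lower()
--         desc_match = query_lower in pair["description"].lower()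
--
--         if any([symbol_match, name_match, base_match, quote_match, desc_match]):
--             filtered.append(pair)
--
--     # Sort by relevance
--     # Priority: exact base/quote match > starts with query > contains query
--     filtered.sort(key=lambda x: (
--         x["base"].lower() != query_lower and x["quote"].lower() != query_lower,  # Exact currency match first
--         not x["name"].lower().startswith(query_lower),  # Name starts with query second
--         x["symbol"]  # Alphabetical
--     ))
--
--     return filtered[:limit]
-- ===== SOURCE B (Python) =====
-- from typing import List, Dict, Any
--
-- # B rebuilds the pair catalog from a normalized currency-name table (instead of the
-- # literal 38-dict list) and replaces A's composite-tuple stable sort by four staged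
-- # filter-and-sort passes in priority order.
--
-- CURRENCY_NAMES = {
--     "EUR": "Euro", "GBP": "British Pound", "USD": "US Dollar", "JPY": "Japanese Yen",
--     "CHF": "Swiss Franc", "AUD": "Australian Dollar", "CAD": "Canadian Dollar",
--     "NZD": "New Zealand Dollar", "TRY": "Turkish Lira", "MXN": "Mexican Peso",
--     "ZAR": "South African Rand", "BRL": "Brazilian Real", "INR": "Indian Rupee",
--     "KRW": "South Korean Won", "SGD": "Singapore Dollar", "HKD": "Hong Kong Dollar",
--     "RUB": "Russian Ruble", "PLN": "Polish Zloty", "SEK": "Swedish Krona",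
--     "NOK": "Norwegian Krone", "DKK": "Danish Krone", "CZK": "Czech Koruna",
--     "HUF": "Hungarian Forint", "THB": "Thai Baht",
-- }
--
-- PAIR_SPECS = [
--     ("EUR", "USD", "major"), ("GBP", "USD", "major"), ("USD", "JPY", "major"),
--     ("USD", "CHF", "major"), ("AUD", "USD", "major"), ("USD", "CAD", "major"),
--     ("NZD", "USD", "major"),
--     ("EUR", "GBP", "cross"), ("EUR", "JPY", "cross"), ("GBP", "JPY", "cross"),
--     ("EUR", "CHF", "cross"), ("EUR", "AUD", "cross"), ("EUR", "CAD", "cross"),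
--     ("GBP", "CHF", "cross"), ("GBP", "AUD", "cross"), ("GBP", "CAD", "cross"),
--     ("AUD", "CAD", "cross"), ("AUD", "JPY", "cross"), ("AUD", "CHF", "cross"),
--     ("NZD", "JPY", "cross"), ("CAD", "JPY", "cross"), ("CHF", "JPY", "cross"),
--     ("USD", "TRY", "exotic"), ("USD", "MXN", "exotic"), ("USD", "ZAR", "exotic"),
--     ("USD", "BRL", "exotic"), ("USD", "INR", "exotic"), ("USD", "KRW", "exotic"),
--     ("USD", "SGD", "exotic"), ("USD", "HKD", "exotic"), ("USD", "RUB", "exotic"),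
--     ("USD", "PLN", "exotic"), ("USD", "SEK", "exotic"), ("USD", "NOK", "exotic"),
--     ("USD", "DKK", "exotic"), ("USD", "CZK", "exotic"), ("USD", "HUF", "exotic"),
--     ("USD", "THB", "exotic"),
-- ]
--
-- def _row(base: str, quote: str, category: str) -> Dict[str, Any]:
--     return {
--         "symbol": base + quote + "=X",
--         "name": base + "/" + quote,
--         "base": base,
--         "quote": quote,
--         "category": category,
--         "description": CURRENCY_NAMES[base] + " vs " + CURRENCY_NAMES[quote],
--     }
--
-- PAIR_TABLE = [_row(b, q, c) for (b, q, c) in PAIR_SPECS]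
--
-- def search_forex_pairs(query: str, limit: int = 20) -> List[Dict[str, Any]]:
--     if not query:
--         return PAIR_TABLE[:limit]
--
--     q = query.lower().strip()
--     matches = [p for p in PAIR_TABLE
--                if any(q in p[f].lower()
--                       for f in ("symbol", "name", "base", "quote", "description"))]
--
--     def rank(p):
--         exact = q == p["base"].lower() or q == p["quote"].lower()
--         starts = p["name"].lower().startswith(q)
--         return (0 if exact else 2) + (0 if starts else 1)
--
--     out = []
--     for r in range(4):
--         out += sorted((p for p in matches if rank(p) == r),
--                       key=lambda p: p["symbol"])
--     return out[:limit]
-- ===== Notes on version B (the rewrite author's own statement) =====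
-- stated objective: alternative
-- what changed: B rebuilds the pair catalog from a normalized currency-name table plus (base,quote,category) specs instead of the literal dict list, and replaces A's stable sort by a composite (exact-currency, name-starts, symbol) tuple key with four staged filter-and-sort-by-symbol passes concatenated in priority order.
import Mathlib
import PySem

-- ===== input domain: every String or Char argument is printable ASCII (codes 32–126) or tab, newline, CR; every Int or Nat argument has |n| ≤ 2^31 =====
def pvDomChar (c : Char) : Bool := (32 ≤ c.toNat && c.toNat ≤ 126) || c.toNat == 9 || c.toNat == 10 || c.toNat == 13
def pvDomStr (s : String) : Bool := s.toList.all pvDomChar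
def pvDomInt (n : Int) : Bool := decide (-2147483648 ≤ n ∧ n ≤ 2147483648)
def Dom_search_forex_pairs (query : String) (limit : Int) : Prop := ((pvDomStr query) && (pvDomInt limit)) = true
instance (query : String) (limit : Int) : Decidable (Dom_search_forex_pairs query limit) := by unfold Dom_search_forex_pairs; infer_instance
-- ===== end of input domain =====

-- B rebuilds the pair catalog from a normalized currency-name table plus (base,quote,category)
-- specs, and replaces A's composite-tuple stable sort by four staged filter-and-sort-by-symbol
-- passes concatenated in priority order; same return value, no speed claim (alternative).

-- dict field lookup pair[k] (all keys present in every row, so the default is never used)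
def pvFld (p : List (String × String)) (k : String) : String :=
  ((PySem.Dict.mk p).get? k).getD ""

-- ===== PORT A =====
def FOREX_PAIRS : List (List (String × String)) := [
  [("symbol", "EURUSD=X"), ("name", "EUR/USD"), ("base", "EUR"), ("quote", "USD"), ("category", "major"), ("description", "Euro vs US Dollar")],
  [("symbol", "GBPUSD=X"), ("name", "GBP/USD"), ("base", "GBP"), ("quote", "USD"), ("category", "major"), ("description", "British Pound vs US Dollar")],
  [("symbol", "USDJPY=X"), ("name", "USD/JPY"), ("base", "USD"), ("quote", "JPY"), ("category", "major"), ("description", "US Dollar vs Japanese Yen")],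
  [("symbol", "USDCHF=X"), ("name", "USD/CHF"), ("base", "USD"), ("quote", "CHF"), ("category", "major"), ("description", "US Dollar vs Swiss Franc")],
  [("symbol", "AUDUSD=X"), ("name", "AUD/USD"), ("base", "AUD"), ("quote", "USD"), ("category", "major"), ("description", "Australian Dollar vs US Dollar")],
  [("symbol", "USDCAD=X"), ("name", "USD/CAD"), ("base", "USD"), ("quote", "CAD"), ("category", "major"), ("description", "US Dollar vs Canadian Dollar")],
  [("symbol", "NZDUSD=X"), ("name", "NZD/USD"), ("base", "NZD"), ("quote", "USD"), ("category", "major"), ("description", "New Zealand Dollar vs US Dollar")],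
  [("symbol", "EURGBP=X"), ("name", "EUR/GBP"), ("base", "EUR"), ("quote", "GBP"), ("category", "cross"), ("description", "Euro vs British Pound")],
  [("symbol", "EURJPY=X"), ("name", "EUR/JPY"), ("base", "EUR"), ("quote", "JPY"), ("category", "cross"), ("description", "Euro vs Japanese Yen")],
  [("symbol", "GBPJPY=X"), ("name", "GBP/JPY"), ("base", "GBP"), ("quote", "JPY"), ("category", "cross"), ("description", "British Pound vs Japanese Yen")],
  [("symbol", "EURCHF=X"), ("name", "EUR/CHF"), ("base", "EUR"), ("quote", "CHF"), ("category", "cross"), ("description", "Euro vs Swiss Franc")],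
  [("symbol", "EURAUD=X"), ("name", "EUR/AUD"), ("base", "EUR"), ("quote", "AUD"), ("category", "cross"), ("description", "Euro vs Australian Dollar")],
  [("symbol", "EURCAD=X"), ("name", "EUR/CAD"), ("base", "EUR"), ("quote", "CAD"), ("category", "cross"), ("description", "Euro vs Canadian Dollar")],
  [("symbol", "GBPCHF=X"), ("name", "GBP/CHF"), ("base", "GBP"), ("quote", "CHF"), ("category", "cross"), ("description", "British Pound vs Swiss Franc")],
  [("symbol", "GBPAUD=X"), ("name", "GBP/AUD"), ("base", "GBP"), ("quote", "AUD"), ("category", "cross"), ("description", "British Pound vs Australian Dollar")],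
  [("symbol", "GBPCAD=X"), ("name", "GBP/CAD"), ("base", "GBP"), ("quote", "CAD"), ("category", "cross"), ("description", "British Pound vs Canadian Dollar")],
  [("symbol", "AUDCAD=X"), ("name", "AUD/CAD"), ("base", "AUD"), ("quote", "CAD"), ("category", "cross"), ("description", "Australian Dollar vs Canadian Dollar")],
  [("symbol", "AUDJPY=X"), ("name", "AUD/JPY"), ("base", "AUD"), ("quote", "JPY"), ("category", "cross"), ("description", "Australian Dollar vs Japanese Yen")],
  [("symbol", "AUDCHF=X"), ("name", "AUD/CHF"), ("base", "AUD"), ("quote", "CHF"), ("category", "cross"), ("description", "Australian Dollar vs Swiss Franc")],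
  [("symbol", "NZDJPY=X"), ("name", "NZD/JPY"), ("base", "NZD"), ("quote", "JPY"), ("category", "cross"), ("description", "New Zealand Dollar vs Japanese Yen")],
  [("symbol", "CADJPY=X"), ("name", "CAD/JPY"), ("base", "CAD"), ("quote", "JPY"), ("category", "cross"), ("description", "Canadian Dollar vs Japanese Yen")],
  [("symbol", "CHFJPY=X"), ("name", "CHF/JPY"), ("base", "CHF"), ("quote", "JPY"), ("category", "cross"), ("description", "Swiss Franc vs Japanese Yen")],
  [("symbol", "USDTRY=X"), ("name", "USD/TRY"), ("base", "USD"), ("quote", "TRY"), ("category", "exotic"), ("description", "US Dollar vs Turkish Lira")],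
  [("symbol", "USDMXN=X"), ("name", "USD/MXN"), ("base", "USD"), ("quote", "MXN"), ("category", "exotic"), ("description", "US Dollar vs Mexican Peso")],
  [("symbol", "USDZAR=X"), ("name", "USD/ZAR"), ("base", "USD"), ("quote", "ZAR"), ("category", "exotic"), ("description", "US Dollar vs South African Rand")],
  [("symbol", "USDBRL=X"), ("name", "USD/BRL"), ("base", "USD"), ("quote", "BRL"), ("category", "exotic"), ("description", "US Dollar vs Brazilian Real")],
  [("symbol", "USDINR=X"), ("name", "USD/INR"), ("base", "USD"), ("quote", "INR"), ("category", "exotic"), ("description", "US Dollar vs Indian Rupee")],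
  [("symbol", "USDKRW=X"), ("name", "USD/KRW"), ("base", "USD"), ("quote", "KRW"), ("category", "exotic"), ("description", "US Dollar vs South Korean Won")],
  [("symbol", "USDSGD=X"), ("name", "USD/SGD"), ("base", "USD"), ("quote", "SGD"), ("category", "exotic"), ("description", "US Dollar vs Singapore Dollar")],
  [("symbol", "USDHKD=X"), ("name", "USD/HKD"), ("base", "USD"), ("quote", "HKD"), ("category", "exotic"), ("description", "US Dollar vs Hong Kong Dollar")],
  [("symbol", "USDRUB=X"), ("name", "USD/RUB"), ("base", "USD"), ("quote", "RUB"), ("category", "exotic"), ("description", "US Dollar vs Russian Ruble")],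
  [("symbol", "USDPLN=X"), ("name", "USD/PLN"), ("base", "USD"), ("quote", "PLN"), ("category", "exotic"), ("description", "US Dollar vs Polish Zloty")],
  [("symbol", "USDSEK=X"), ("name", "USD/SEK"), ("base", "USD"), ("quote", "SEK"), ("category", "exotic"), ("description", "US Dollar vs Swedish Krona")],
  [("symbol", "USDNOK=X"), ("name", "USD/NOK"), ("base", "USD"), ("quote", "NOK"), ("category", "exotic"), ("description", "US Dollar vs Norwegian Krone")],
  [("symbol", "USDDKK=X"), ("name", "USD/DKK"), ("base", "USD"), ("quote", "DKK"), ("category", "exotic"), ("description", "US Dollar vs Danish Krone")],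
  [("symbol", "USDCZK=X"), ("name", "USD/CZK"), ("base", "USD"), ("quote", "CZK"), ("category", "exotic"), ("description", "US Dollar vs Czech Koruna")],
  [("symbol", "USDHUF=X"), ("name", "USD/HUF"), ("base", "USD"), ("quote", "HUF"), ("category", "exotic"), ("description", "US Dollar vs Hungarian Forint")],
  [("symbol", "USDTHB=X"), ("name", "USD/THB"), ("base", "USD"), ("quote", "THB"), ("category", "exotic"), ("description", "US Dollar vs Thai Baht")]
]

def search_forex_pairs (query : String) (limit : Int) : List (List (String × String)) :=
  if query == "" then PySem.List.slice FOREX_PAIRS none (some limit)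
  else
    let query_lower := PySem.Str.strip (PySem.Str.lower query)
    let filtered := FOREX_PAIRS.foldl (fun acc pair =>
      let symbol_match := PySem.Str.isIn query_lower (PySem.Str.lower (pvFld pair "symbol"))
      let name_match := PySem.Str.isIn query_lower (PySem.Str.lower (pvFld pair "name"))
      let base_match := (query_lower == PySem.Str.lower (pvFld pair "base")) ||
        PySem.Str.isIn query_lower (PySem.Str.lower (pvFld pair "base"))
      let quote_match := (query_lower == PySem.Str.lower (pvFld pair "quote")) ||
        PySem.Str.isIn query_lower (PySem.Str.lower (pvFld pair "quote"))
      let desc_match := PySem.Str.isIn query_lower (PySem.Str.lower (pvFld pair "description"))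
      if symbol_match || name_match || base_match || quote_match || desc_match then acc ++ [pair]
      else acc) []
    -- Python's tuple key (bool, bool, str) compared lexicographically = toLex (Bool ×ₗ Bool ×ₗ String)
    let sortedL := PySem.List.sorted filtered (fun x =>
      toLex ((!(PySem.Str.lower (pvFld x "base") == query_lower) &&
              !(PySem.Str.lower (pvFld x "quote") == query_lower),
        toLex ((!(PySem.Str.startswith (PySem.Str.lower (pvFld x "name")) query_lower),
          pvFld x "symbol")))))
    PySem.List.slice sortedL none (some limit)

-- ===== PORT B =====
def pvCURRENCY_NAMES : PySem.Dict String String := PySem.Dict.mk [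
  ("EUR", "Euro"), ("GBP", "British Pound"), ("USD", "US Dollar"), ("JPY", "Japanese Yen"),
  ("CHF", "Swiss Franc"), ("AUD", "Australian Dollar"), ("CAD", "Canadian Dollar"),
  ("NZD", "New Zealand Dollar"), ("TRY", "Turkish Lira"), ("MXN", "Mexican Peso"),
  ("ZAR", "South African Rand"), ("BRL", "Brazilian Real"), ("INR", "Indian Rupee"),
  ("KRW", "South Korean Won"), ("SGD", "Singapore Dollar"), ("HKD", "Hong Kong Dollar"),
  ("RUB", "Russian Ruble"), ("PLN", "Polish Zloty"), ("SEK", "Swedish Krona"),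
  ("NOK", "Norwegian Krone"), ("DKK", "Danish Krone"), ("CZK", "Czech Koruna"),
  ("HUF", "Hungarian Forint"), ("THB", "Thai Baht")]

def pvPAIR_SPECS : List (String × String × String) := [
  ("EUR", "USD", "major"), ("GBP", "USD", "major"), ("USD", "JPY", "major"),
  ("USD", "CHF", "major"), ("AUD", "USD", "major"), ("USD", "CAD", "major"),
  ("NZD", "USD", "major"),
  ("EUR", "GBP", "cross"), ("EUR", "JPY", "cross"), ("GBP", "JPY", "cross"),
  ("EUR", "CHF", "cross"), ("EUR", "AUD", "cross"), ("EUR", "CAD", "cross"),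
  ("GBP", "CHF", "cross"), ("GBP", "AUD", "cross"), ("GBP", "CAD", "cross"),
  ("AUD", "CAD", "cross"), ("AUD", "JPY", "cross"), ("AUD", "CHF", "cross"),
  ("NZD", "JPY", "cross"), ("CAD", "JPY", "cross"), ("CHF", "JPY", "cross"),
  ("USD", "TRY", "exotic"), ("USD", "MXN", "exotic"), ("USD", "ZAR", "exotic"),
  ("USD", "BRL", "exotic"), ("USD", "INR", "exotic"), ("USD", "KRW", "exotic"),
  ("USD", "SGD", "exotic"), ("USD", "HKD", "exotic"), ("USD", "RUB", "exotic"),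
  ("USD", "PLN", "exotic"), ("USD", "SEK", "exotic"), ("USD", "NOK", "exotic"),
  ("USD", "DKK", "exotic"), ("USD", "CZK", "exotic"), ("USD", "HUF", "exotic"),
  ("USD", "THB", "exotic")]

-- _row(base, quote, category); CURRENCY_NAMES[x]: every code used in pvPAIR_SPECS is a key
-- of pvCURRENCY_NAMES, so the KeyError branch (get? = none) never fires and getD "" is exact
def pvRow (b q c : String) : List (String × String) :=
  [("symbol", b ++ q ++ "=X"), ("name", b ++ "/" ++ q), ("base", b), ("quote", q),
   ("category", c),
   ("description", ((pvCURRENCY_NAMES.get? b).getD "") ++ " vs " ++ ((pvCURRENCY_NAMES.get? q).getD ""))]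

def pvPAIR_TABLE : List (List (String × String)) :=
  pvPAIR_SPECS.map (fun s => pvRow s.1 s.2.1 s.2.2)

def pvBMatch (q : String) (p : List (String × String)) : Bool :=
  ["symbol", "name", "base", "quote", "description"].any
    (fun f => PySem.Str.isIn q (PySem.Str.lower (pvFld p f)))

def pvRank (q : String) (p : List (String × String)) : Int :=
  (if (q == PySem.Str.lower (pvFld p "base")) || (q == PySem.Str.lower (pvFld p "quote"))
     then 0 else 2) +
  (if PySem.Str.startswith (PySem.Str.lower (pvFld p "name")) q then 0 else 1)

def search_forex_pairs_alt (query : String) (limit : Int) : List (List (String × String)) :=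
  if query == "" then PySem.List.slice pvPAIR_TABLE none (some limit)
  else
    let q := PySem.Str.strip (PySem.Str.lower query)
    let pvMatches := pvPAIR_TABLE.filter (pvBMatch q)
    let out := (PySem.List.pyRange 0 4 1).foldl (fun acc r =>
      acc ++ PySem.List.sorted (pvMatches.filter (fun p => pvRank q p == r))
        (fun p => pvFld p "symbol")) []
    PySem.List.slice out none (some limit)

-- ===== PRECONDITION & SPEC =====
def Spec_search_forex_pairs (query : String) (limit : Int) (out : List (List (String × String))) : Prop := out = search_forex_pairs_alt query limit
instance (query : String) (limit : Int) (out : List (List (String × String))) : Decidable (Spec_search_forex_pairs query limit out) := by unfold Spec_search_forex_pairs; infer_instance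

-- ===== CLAIM =====
def Claim_equal_search_forex_pairs : Prop := ∀ (query : String) (limit : Int), Dom_search_forex_pairs query limit → Spec_search_forex_pairs query limit (search_forex_pairs query limit)

-- ===== LEMMAS AND PROOFS =====

set_option maxHeartbeats 1000000 in
lemma pvTABLE_eq : pvPAIR_TABLE = FOREX_PAIRS := by decide

-- A's five match booleans, as one predicate (proof-side name for A's filter condition)
def pvMatchA (q : String) (x : List (String × String)) : Bool :=
  PySem.Str.isIn q (PySem.Str.lower (pvFld x "symbol")) ||
  PySem.Str.isIn q (PySem.Str.lower (pvFld x "name")) ||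
  ((q == PySem.Str.lower (pvFld x "base")) || PySem.Str.isIn q (PySem.Str.lower (pvFld x "base"))) ||
  ((q == PySem.Str.lower (pvFld x "quote")) || PySem.Str.isIn q (PySem.Str.lower (pvFld x "quote"))) ||
  PySem.Str.isIn q (PySem.Str.lower (pvFld x "description"))

def pvFA (q : String) (x : List (String × String)) : Bool :=
  !(PySem.Str.lower (pvFld x "base") == q) && !(PySem.Str.lower (pvFld x "quote") == q)

def pvGA (q : String) (x : List (String × String)) : Bool :=
  !(PySem.Str.startswith (PySem.Str.lower (pvFld x "name")) q)

lemma pvIsIn_self (s : String) : PySem.Str.isIn s s = true :=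
  (PySem.Str.isIn_iff_infix s s).mpr (List.infix_refl _)

lemma pvBeqOrIsIn (a b : String) :
    ((a == b) || PySem.Str.isIn a b) = PySem.Str.isIn a b := by
  cases h : a == b
  · simp
  · have hab : a = b := eq_of_beq h
    subst hab
    rw [pvIsIn_self]; simp

lemma pvBeqComm (a b : String) : (a == b) = (b == a) := by
  cases h : a == b
  · cases h2 : b == a
    · rfl
    · exact absurd (eq_of_beq h2).symm (by simpa using h)
  · rw [eq_of_beq h]; simp

lemma pvMatchA_eq_pvBMatch (q : String) (x : List (String × String)) :
    pvMatchA q x = pvBMatch q x := by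
  unfold pvMatchA pvBMatch
  simp only [List.any_cons, List.any_nil, Bool.or_false]
  rw [pvBeqOrIsIn q (PySem.Str.lower (pvFld x "base")), pvBeqOrIsIn q (PySem.Str.lower (pvFld x "quote"))]
  simp [Bool.or_assoc]

-- A's filter loop is List.filter pvMatchA
lemma pvFilterA (q : String) (l : List (List (String × String))) (acc : List (List (String × String))) :
    l.foldl (fun acc pair => if pvMatchA q pair then acc ++ [pair] else acc) acc =
      acc ++ l.filter (pvMatchA q) := by
  induction l generalizing acc with
  | nil => simp
  | cons x t ih =>
    cases hx : pvMatchA q x <;> simp [hx, ih]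

-- B's integer rank selects exactly A's four lexicographic buckets
lemma pvRank_eq0 (q : String) (p : List (String × String)) :
    (pvRank q p == (0 : Int)) = (!pvFA q p && !pvGA q p) := by
  unfold pvRank pvFA pvGA
  rw [pvBeqComm (PySem.Str.lower (pvFld p "base")) q, pvBeqComm (PySem.Str.lower (pvFld p "quote")) q]
  cases q == PySem.Str.lower (pvFld p "base") <;> cases q == PySem.Str.lower (pvFld p "quote") <;>
    cases PySem.Str.startswith (PySem.Str.lower (pvFld p "name")) q <;> rfl

lemma pvRank_eq1 (q : String) (p : List (String × String)) :
    (pvRank q p == (1 : Int)) = (!pvFA q p && pvGA q p) := by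
  unfold pvRank pvFA pvGA
  rw [pvBeqComm (PySem.Str.lower (pvFld p "base")) q, pvBeqComm (PySem.Str.lower (pvFld p "quote")) q]
  cases q == PySem.Str.lower (pvFld p "base") <;> cases q == PySem.Str.lower (pvFld p "quote") <;>
    cases PySem.Str.startswith (PySem.Str.lower (pvFld p "name")) q <;> rfl

lemma pvRank_eq2 (q : String) (p : List (String × String)) :
    (pvRank q p == (2 : Int)) = (pvFA q p && !pvGA q p) := by
  unfold pvRank pvFA pvGA
  rw [pvBeqComm (PySem.Str.lower (pvFld p "base")) q, pvBeqComm (PySem.Str.lower (pvFld p "quote")) q]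
  cases q == PySem.Str.lower (pvFld p "base") <;> cases q == PySem.Str.lower (pvFld p "quote") <;>
    cases PySem.Str.startswith (PySem.Str.lower (pvFld p "name")) q <;> rfl

lemma pvRank_eq3 (q : String) (p : List (String × String)) :
    (pvRank q p == (3 : Int)) = (pvFA q p && pvGA q p) := by
  unfold pvRank pvFA pvGA
  rw [pvBeqComm (PySem.Str.lower (pvFld p "base")) q, pvBeqComm (PySem.Str.lower (pvFld p "quote")) q]
  cases q == PySem.Str.lower (pvFld p "base") <;> cases q == PySem.Str.lower (pvFld p "quote") <;>
    cases PySem.Str.startswith (PySem.Str.lower (pvFld p "name")) q <;> rfl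

-- stable sort by the lexicographic (f, g, s) key = four-way partition, each part sorted by s
lemma pvSortSplit {α : Type} (l : List α) (f g : α → Bool) (s : α → String)
    (h : l.Pairwise (fun a b => s a ≠ s b)) :
    PySem.List.sorted l (fun x => toLex (f x, toLex (g x, s x))) =
      PySem.List.sorted (l.filter (fun x => !f x && !g x)) s ++
      (PySem.List.sorted (l.filter (fun x => !f x && g x)) s ++
      (PySem.List.sorted (l.filter (fun x => f x && !g x)) s ++
      PySem.List.sorted (l.filter (fun x => f x && g x)) s)) := by
  apply PySem.List.sorted_eq_of_perm_of_pairwise_lt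
  · -- the concatenation is a permutation of l
    have pb : ∀ c : α → Bool, (PySem.List.sorted (l.filter c) s).Perm (l.filter c) :=
      fun c => PySem.List.sorted_perm (l.filter c) s false
    have e00 : l.filter (fun x => !f x && !g x) = (l.filter (fun x => !f x)).filter (fun x => !g x) := by
      rw [List.filter_filter]; exact List.filter_congr (fun x _ => Bool.and_comm _ _)
    have e01 : l.filter (fun x => !f x && g x) = (l.filter (fun x => !f x)).filter g := by
      rw [List.filter_filter]; exact List.filter_congr (fun x _ => Bool.and_comm _ _)
    have e10 : l.filter (fun x => f x && !g x) = (l.filter f).filter (fun x => !g x) := by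
      rw [List.filter_filter]; exact List.filter_congr (fun x _ => Bool.and_comm _ _)
    have e11 : l.filter (fun x => f x && g x) = (l.filter f).filter g := by
      rw [List.filter_filter]; exact List.filter_congr (fun x _ => Bool.and_comm _ _)
    have h0 : ((l.filter (fun x => !f x)).filter (fun x => !g x) ++ (l.filter (fun x => !f x)).filter g).Perm
        (l.filter (fun x => !f x)) := by
      have := List.filter_append_perm (fun x => !g x) (l.filter (fun x => !f x))
      simpa [Bool.not_not] using this
    have h1 : ((l.filter f).filter (fun x => !g x) ++ (l.filter f).filter g).Perm (l.filter f) := by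
      have := List.filter_append_perm (fun x => !g x) (l.filter f)
      simpa [Bool.not_not] using this
    have h2 : (l.filter (fun x => !f x) ++ l.filter f).Perm l := by
      have := List.filter_append_perm (fun x => !f x) l
      simpa [Bool.not_not] using this
    refine ((pb _).append ((pb _).append ((pb _).append (pb _)))).trans ?_
    rw [e00, e01, e10, e11]
    refine List.Perm.trans ?_ ((h0.append h1).trans h2)
    simp [List.append_assoc]
  · -- the concatenation is strictly increasing in the lexicographic key
    have hmem : ∀ (c : α → Bool) (x : α), x ∈ PySem.List.sorted (l.filter c) s → c x = true :=
      fun c x hx => (List.mem_filter.mp ((PySem.List.mem_sorted (l.filter c) s false x).mp hx)).2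
    have hin : ∀ (c : α → Bool), (∀ a b, c a = true → c b = true → f a = f b ∧ g a = g b) →
        (PySem.List.sorted (l.filter c) s).Pairwise
          (fun a b => (fun x => toLex (f x, toLex (g x, s x))) a < (fun x => toLex (f x, toLex (g x, s x))) b) := by
      intro c hc
      have hle := PySem.List.sorted_pairwise (l.filter c) s
      have hne : (PySem.List.sorted (l.filter c) s).Pairwise (fun a b => s a ≠ s b) := by
        refine ((PySem.List.sorted_perm (l.filter c) s false).pairwise_iff (fun hxy => Ne.symm hxy)).mpr ?_
        exact h.sublist List.filter_sublist
      refine (hle.and hne).imp_of_mem ?_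
      intro a b ha hb hab
      obtain ⟨hfe, hge⟩ := hc a b (hmem c a ha) (hmem c b hb)
      simp only [Prod.Lex.toLex_lt_toLex]
      exact Or.inr ⟨hfe, Or.inr ⟨hge, lt_of_le_of_ne hab.1 hab.2⟩⟩
    have hcross : ∀ (a b : α), f a = f b → g a = false → g b = true →
        (toLex (f a, toLex (g a, s a)) < toLex (f b, toLex (g b, s b))) := by
      intro a b hf hga hgb
      simp only [Prod.Lex.toLex_lt_toLex]
      exact Or.inr ⟨hf, Or.inl (by rw [hga, hgb]; exact Bool.lt_iff.mpr ⟨rfl, rfl⟩)⟩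
    have hcrossF : ∀ (a b : α), f a = false → f b = true →
        (toLex (f a, toLex (g a, s a)) < toLex (f b, toLex (g b, s b))) := by
      intro a b hfa hfb
      simp only [Prod.Lex.toLex_lt_toLex]
      exact Or.inl (by rw [hfa, hfb]; exact Bool.lt_iff.mpr ⟨rfl, rfl⟩)
    have m00 : ∀ x ∈ PySem.List.sorted (l.filter (fun x => !f x && !g x)) s, f x = false ∧ g x = false := by
      intro x hx; have hh := hmem _ x hx; simp only [Bool.and_eq_true, Bool.not_eq_true'] at hh; exact hh
    have m01 : ∀ x ∈ PySem.List.sorted (l.filter (fun x => !f x && g x)) s, f x = false ∧ g x = true := by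
      intro x hx; have hh := hmem _ x hx; simp only [Bool.and_eq_true, Bool.not_eq_true'] at hh; exact hh
    have m10 : ∀ x ∈ PySem.List.sorted (l.filter (fun x => f x && !g x)) s, f x = true ∧ g x = false := by
      intro x hx; have hh := hmem _ x hx; simp only [Bool.and_eq_true, Bool.not_eq_true'] at hh; exact hh
    have m11 : ∀ x ∈ PySem.List.sorted (l.filter (fun x => f x && g x)) s, f x = true ∧ g x = true := by
      intro x hx; have hh := hmem _ x hx; simp only [Bool.and_eq_true] at hh; exact hh
    rw [List.pairwise_append]
    refine ⟨hin _ ?_, ?_, ?_⟩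
    · intro a b ha hb
      simp only [Bool.and_eq_true, Bool.not_eq_true'] at ha hb
      exact ⟨by rw [ha.1, hb.1], by rw [ha.2, hb.2]⟩
    · rw [List.pairwise_append]
      refine ⟨hin _ ?_, ?_, ?_⟩
      · intro a b ha hb
        simp only [Bool.and_eq_true, Bool.not_eq_true'] at ha hb
        exact ⟨by rw [ha.1, hb.1], by rw [ha.2, hb.2]⟩
      · rw [List.pairwise_append]
        refine ⟨hin _ ?_, hin _ ?_, ?_⟩
        · intro a b ha hb
          simp only [Bool.and_eq_true, Bool.not_eq_true'] at ha hb
          exact ⟨by rw [ha.1, hb.1], by rw [ha.2, hb.2]⟩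
        · intro a b ha hb
          simp only [Bool.and_eq_true] at ha hb
          exact ⟨by rw [ha.1, hb.1], by rw [ha.2, hb.2]⟩
        · intro a ha b hb
          obtain ⟨hfa, hga⟩ := m10 a ha
          obtain ⟨hfb, hgb⟩ := m11 b hb
          exact hcross a b (hfa.trans hfb.symm) hga hgb
      · intro a ha b hb
        obtain ⟨hfa, hga⟩ := m01 a ha
        rcases List.mem_append.mp hb with hb | hb
        · exact hcrossF a b hfa (m10 b hb).1
        · exact hcrossF a b hfa (m11 b hb).1
    · intro a ha b hb
      obtain ⟨hfa, hga⟩ := m00 a ha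
      rcases List.mem_append.mp hb with hb | hb
      · obtain ⟨hfb, hgb⟩ := m01 b hb
        exact hcross a b (hfa.trans hfb.symm) hga hgb
      · rcases List.mem_append.mp hb with hb | hb
        · exact hcrossF a b hfa (m10 b hb).1
        · exact hcrossF a b hfa (m11 b hb).1

lemma pvSymbolsDistinct : FOREX_PAIRS.Pairwise (fun a b => pvFld a "symbol" ≠ pvFld b "symbol") := by
  have h : (FOREX_PAIRS.map (fun p => pvFld p "symbol")).Nodup := by decide
  exact List.pairwise_map.mp h

-- B's matches list is A's filtered list
lemma pvMatchesEq (q : String) :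
    pvPAIR_TABLE.filter (pvBMatch q) = FOREX_PAIRS.filter (pvMatchA q) := by
  rw [pvTABLE_eq]
  exact (List.filter_congr (fun x _ => pvMatchA_eq_pvBMatch q x)).symm

-- the non-empty-query branch of A equals the non-empty-query branch of B, for the stripped query
set_option maxHeartbeats 1000000 in
lemma pvMain (q : String) (limit : Int) :
    PySem.List.slice (PySem.List.sorted (FOREX_PAIRS.foldl (fun acc pair =>
        if PySem.Str.isIn q (PySem.Str.lower (pvFld pair "symbol")) ||
           PySem.Str.isIn q (PySem.Str.lower (pvFld pair "name")) ||
           ((q == PySem.Str.lower (pvFld pair "base")) || PySem.Str.isIn q (PySem.Str.lower (pvFld pair "base"))) ||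
           ((q == PySem.Str.lower (pvFld pair "quote")) || PySem.Str.isIn q (PySem.Str.lower (pvFld pair "quote"))) ||
           PySem.Str.isIn q (PySem.Str.lower (pvFld pair "description")) then acc ++ [pair] else acc) [])
      (fun x => toLex ((!(PySem.Str.lower (pvFld x "base") == q) && !(PySem.Str.lower (pvFld x "quote") == q),
        toLex ((!(PySem.Str.startswith (PySem.Str.lower (pvFld x "name")) q), pvFld x "symbol")))))) none (some limit) =
    PySem.List.slice ((PySem.List.pyRange 0 4 1).foldl (fun acc r =>
      acc ++ PySem.List.sorted ((pvPAIR_TABLE.filter (pvBMatch q)).filter (fun p => pvRank q p == r))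
        (fun p => pvFld p "symbol")) []) none (some limit) := by
  have hpair : (FOREX_PAIRS.filter (pvMatchA q)).Pairwise
      (fun a b => pvFld a "symbol" ≠ pvFld b "symbol") :=
    pvSymbolsDistinct.sublist List.filter_sublist
  have hfil : FOREX_PAIRS.foldl (fun acc pair =>
      if PySem.Str.isIn q (PySem.Str.lower (pvFld pair "symbol")) ||
         PySem.Str.isIn q (PySem.Str.lower (pvFld pair "name")) ||
         ((q == PySem.Str.lower (pvFld pair "base")) || PySem.Str.isIn q (PySem.Str.lower (pvFld pair "base"))) ||
         ((q == PySem.Str.lower (pvFld pair "quote")) || PySem.Str.isIn q (PySem.Str.lower (pvFld pair "quote"))) ||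
         PySem.Str.isIn q (PySem.Str.lower (pvFld pair "description")) then acc ++ [pair] else acc) [] =
      FOREX_PAIRS.filter (pvMatchA q) := pvFilterA q FOREX_PAIRS []
  have h4 : PySem.List.pyRange 0 4 1 = [0, 1, 2, 3] := by decide
  rw [hfil, pvMatchesEq q, h4]
  simp only [List.foldl_cons, List.foldl_nil, List.nil_append]
  refine congrArg (fun L => PySem.List.slice L none (some limit)) ?_
  have hsplit := pvSortSplit (FOREX_PAIRS.filter (pvMatchA q)) (pvFA q) (pvGA q)
    (fun p => pvFld p "symbol") hpair
  refine Eq.trans (show _ = _ from hsplit) ?_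
  have e0 : (FOREX_PAIRS.filter (pvMatchA q)).filter (fun p => pvRank q p == (0 : Int)) =
      (FOREX_PAIRS.filter (pvMatchA q)).filter (fun x => !pvFA q x && !pvGA q x) :=
    List.filter_congr (fun x _ => pvRank_eq0 q x)
  have e1 : (FOREX_PAIRS.filter (pvMatchA q)).filter (fun p => pvRank q p == (1 : Int)) =
      (FOREX_PAIRS.filter (pvMatchA q)).filter (fun x => !pvFA q x && pvGA q x) :=
    List.filter_congr (fun x _ => pvRank_eq1 q x)
  have e2 : (FOREX_PAIRS.filter (pvMatchA q)).filter (fun p => pvRank q p == (2 : Int)) =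
      (FOREX_PAIRS.filter (pvMatchA q)).filter (fun x => pvFA q x && !pvGA q x) :=
    List.filter_congr (fun x _ => pvRank_eq2 q x)
  have e3 : (FOREX_PAIRS.filter (pvMatchA q)).filter (fun p => pvRank q p == (3 : Int)) =
      (FOREX_PAIRS.filter (pvMatchA q)).filter (fun x => pvFA q x && pvGA q x) :=
    List.filter_congr (fun x _ => pvRank_eq3 q x)
  rw [e0, e1, e2, e3]
  simp [List.append_assoc]

-- ===== VERDICT (by name: the statement is the Claim_ definition above) =====
set_option maxHeartbeats 1000000 in
theorem search_forex_pairs_spec : Claim_equal_search_forex_pairs := by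
  intro query limit _
  unfold Spec_search_forex_pairs
  by_cases hq0 : (query == "") = true
  · unfold search_forex_pairs search_forex_pairs_alt
    rw [if_pos hq0, if_pos hq0, pvTABLE_eq]
  · rw [Bool.not_eq_true] at hq0
    simp only [search_forex_pairs, search_forex_pairs_alt, hq0, Bool.false_eq_true, if_false]
    exact pvMain (PySem.Str.strip (PySem.Str.lower query)) limit
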